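-- pv_equiv track=rewrite | github.com/katzthebrat/RosethornBot | rosethorn_watcher.py | extract_restart_data
-- ===== SOURCE A (Python) =====
-- def extract_restart_data(pm2_output):
--     lines = pm2_output.splitlines()
--     restart_count = 0
--     restart_time = None
--     for line in lines:
--         if "restart count" in line:
--             restart_count = int(line.strip().split(":")[1])
--         if "last restart" in line:
--             restart_time = line.strip().split(":")[1].strip()
--     return restart_count, restart_time
-- ===== SOURCE B (Python) =====
-- def extract_restart_data(pm2_output):
--     restart_count = None
--     restart_time = None
--     for line in reversed(pm2_output.splitlines()):
--         if restart_count is None and "restart count" in line: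
--             restart_count = int(line.strip().split(":")[1])
--         if restart_time is None and "last restart" in line:
--             restart_time = line.strip().split(":")[1].strip()
--         if restart_count is not None and restart_time is not None:
--             break
--     return (0 if restart_count is None else restart_count), restart_time
-- ===== Notes on version B (the rewrite author's own statement) =====
-- stated objective: alternative
-- what changed: Replaces A's forward loop that parses every matching line and lets later matches overwrite earlier ones by a backwards scan with early exit that parses at most one line per field (the last match), defaulting to 0/None.
import Mathlib
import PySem

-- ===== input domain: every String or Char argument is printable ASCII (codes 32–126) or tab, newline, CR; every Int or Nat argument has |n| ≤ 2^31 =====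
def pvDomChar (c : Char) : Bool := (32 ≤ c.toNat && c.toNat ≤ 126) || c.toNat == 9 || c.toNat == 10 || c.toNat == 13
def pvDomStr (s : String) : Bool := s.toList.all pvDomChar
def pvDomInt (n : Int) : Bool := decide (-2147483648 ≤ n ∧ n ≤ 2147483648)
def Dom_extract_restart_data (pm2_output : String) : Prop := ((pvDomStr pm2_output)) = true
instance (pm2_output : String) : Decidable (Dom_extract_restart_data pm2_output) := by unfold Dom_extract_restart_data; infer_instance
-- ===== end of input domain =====

-- B scans the lines BACKWARDS with an early exit, parsing at most one line per field
-- (the last match of each kind), instead of A's forward loop that parses every matching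
-- line and overwrites; objective: alternative. Equivalence is on the inputs where A
-- returns normally (Pre_ below excludes exactly the inputs where A raises).

-- ===== PORT A =====
-- A, literally: one forward loop over splitlines, carrying (restart_count, restart_time);
-- every matching line is stripped/split/parsed, later matches overwrite earlier ones.
-- On the lines excluded by Pre_ Python raises; there pyGet?/ofStr? give none and the
-- port uses .getD defaults (nothing is claimed on those inputs).
def extract_restart_data (pm2_output : String) : Int × Option String :=
  (PySem.Str.splitlines pm2_output).foldl
    (fun st line =>
      let st1 : Int × Option String :=
        if PySem.Str.isIn "restart count" line then
          (((PySem.Int.ofStr? ((PySem.List.pyGet? (((PySem.Str.split? (PySem.Str.strip line) ":").getD [])) 1).getD "")).getD 0 : Int), st.2)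
        else st
      if PySem.Str.isIn "last restart" line then
        (st1.1, some (PySem.Str.strip ((PySem.List.pyGet? (((PySem.Str.split? (PySem.Str.strip line) ":").getD [])) 1).getD "")))
      else st1)
    ((0 : Int), (none : Option String))

-- ===== PORT B =====
-- B's helpers: int(l.strip().split(":")[1]) and l.strip().split(":")[1].strip()
def pvCountOf (l : String) : Int :=
  (PySem.Int.ofStr? ((PySem.List.pyGet? ((PySem.Str.split? (PySem.Str.strip l) ":").getD []) 1).getD "")).getD 0
def pvTimeOf (l : String) : String :=
  PySem.Str.strip ((PySem.List.pyGet? ((PySem.Str.split? (PySem.Str.strip l) ":").getD []) 1).getD "")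

-- B's loop over reversed(lines): fill each still-None field from the first match seen,
-- break as soon as both are filled.
def pvAltLoop : List String → Option Int × Option String → Option Int × Option String
  | [], st => st
  | line :: rest, st =>
    let st1 : Option Int × Option String :=
      if st.1.isNone && PySem.Str.isIn "restart count" line then (some (pvCountOf line), st.2) else st
    let st2 : Option Int × Option String :=
      if st1.2.isNone && PySem.Str.isIn "last restart" line then (st1.1, some (pvTimeOf line)) else st1
    if st2.1.isSome && st2.2.isSome then st2 else pvAltLoop rest st2

def extract_restart_data_alt (pm2_output : String) : Int × Option String :=
  let st := pvAltLoop (PySem.Str.splitlines pm2_output).reverse (none, none)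
  (st.1.getD 0, st.2)

-- ===== PRECONDITION & SPEC =====
-- Pre_ excludes exactly the inputs where Python A raises: a line containing
-- "restart count" whose stripped form has no ":" (IndexError) or whose part after the
-- first ":" is not an int literal (ValueError), or a line containing "last restart"
-- with no ":" (IndexError).
def Pre_extract_restart_data (pm2_output : String) : Prop :=
  ∀ line ∈ PySem.Str.splitlines pm2_output,
    (PySem.Str.isIn "restart count" line = true →
       2 ≤ ((PySem.Str.split? (PySem.Str.strip line) ":").getD []).length ∧
       (PySem.Int.ofStr? (((PySem.Str.split? (PySem.Str.strip line) ":").getD []).getD 1 "")).isSome = true) ∧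
    (PySem.Str.isIn "last restart" line = true →
       2 ≤ ((PySem.Str.split? (PySem.Str.strip line) ":").getD []).length)
instance (pm2_output : String) : Decidable (Pre_extract_restart_data pm2_output) := by
  unfold Pre_extract_restart_data; infer_instance

def pvWitness_extract_restart_data : String := "restart count: 3\nlast restart: noon"

def Spec_extract_restart_data (pm2_output : String) (out : Int × Option String) : Prop := out = extract_restart_data_alt pm2_output
instance (pm2_output : String) (out : Int × Option String) : Decidable (Spec_extract_restart_data pm2_output out) := by unfold Spec_extract_restart_data; infer_instance

-- ===== CLAIM (what is proved, stated in full; the proofs are below) =====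
def Claim_equal_extract_restart_data : Prop := ∀ (pm2_output : String), Dom_extract_restart_data pm2_output → Pre_extract_restart_data pm2_output → Spec_extract_restart_data pm2_output (extract_restart_data pm2_output)

-- ===== LEMMAS AND PROOFS =====

theorem getLast?_cons_elim {α β : Type} (x : α) (ys : List α) (c : β) (f : α → β) :
    ((x :: ys).getLast?).elim c f = (ys.getLast?).elim (f x) f := by
  rw [List.getLast?_cons]
  cases ys.getLast? <;> rfl

-- The loop of A, run from any start state, ends in the last-match parses.
theorem foldl_eq_lastMatch (lines : List String) (c : Int) (t : Option String) :
    lines.foldl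
      (fun st line =>
        let st1 : Int × Option String :=
          if PySem.Str.isIn "restart count" line then
            (((PySem.Int.ofStr? ((PySem.List.pyGet? (((PySem.Str.split? (PySem.Str.strip line) ":").getD [])) 1).getD "")).getD 0 : Int), st.2)
          else st
        if PySem.Str.isIn "last restart" line then
          (st1.1, some (PySem.Str.strip ((PySem.List.pyGet? (((PySem.Str.split? (PySem.Str.strip line) ":").getD [])) 1).getD "")))
        else st1) (c, t)
    = (((lines.filter (fun l => PySem.Str.isIn "restart count" l)).getLast?).elim c pvCountOf,
       ((lines.filter (fun l => PySem.Str.isIn "last restart" l)).getLast?).elim t (fun l => some (pvTimeOf l))) := by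
  induction lines generalizing c t with
  | nil => rfl
  | cons x xs ih =>
    simp only [List.foldl_cons, List.filter_cons]
    by_cases h1 : PySem.Str.isIn "restart count" x = true <;>
      by_cases h2 : PySem.Str.isIn "last restart" x = true <;>
        simp only [h1, h2, if_pos, if_neg, Bool.false_eq_true,
          not_false_iff, ih, getLast?_cons_elim, pvCountOf, pvTimeOf]

-- B's backwards loop fills each still-empty field from the FIRST match it meets.
theorem altLoop_spec (xs : List String) (st : Option Int × Option String) :
    pvAltLoop xs st =
      (st.1.or ((xs.filter (fun l => PySem.Str.isIn "restart count" l)).head?.map pvCountOf),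
       st.2.or ((xs.filter (fun l => PySem.Str.isIn "last restart" l)).head?.map pvTimeOf)) := by
  induction xs generalizing st with
  | nil => simp [pvAltLoop]
  | cons x xs ih =>
    obtain ⟨c, t⟩ := st
    cases hc1 : PySem.Str.isIn "restart count" x <;>
      cases hc2 : PySem.Str.isIn "last restart" x <;>
        simp at hc1 hc2 <;>
          cases c <;> cases t <;>
            simp [pvAltLoop, hc1, hc2, ih, Option.or]

-- ===== VERDICT (by name: the statement is the Claim_ definition above) =====
theorem extract_restart_data_spec : Claim_equal_extract_restart_data := by
  intro pm2_output _ _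
  unfold Spec_extract_restart_data extract_restart_data extract_restart_data_alt
  rw [foldl_eq_lastMatch]
  simp only [altLoop_spec, List.filter_reverse, List.head?_reverse, Option.or]
  cases h1 : (List.filter (fun l => PySem.Str.isIn "restart count" l) (PySem.Str.splitlines pm2_output)).getLast? <;>
    cases h2 : (List.filter (fun l => PySem.Str.isIn "last restart" l) (PySem.Str.splitlines pm2_output)).getLast? <;>
      simp
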